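-- pv_equiv track=rewrite | github.com/tarexo/informaticup-profit | helper/functions/building_placer.py | check_next_to_deposit
-- ===== SOURCE A (Python) =====
-- def check_next_to_deposit(env,x,y, depostis_outlets):
--     border = []
--     for i in range(x-1, x+6):
--         border.append([i,y-1])
--         border.append([i,y+6])
--     for i in range(y, y+5):
--         border.append([x-1,i])
--         border.append([x+6,i])
--     for b in border:
--         if b in depostis_outlets: return False
--     return True
-- ===== SOURCE B (Python) =====
-- def check_next_to_deposit(env, x, y, depostis_outlets):
--     # B: test each outlet against the border-frame predicate directly,
--     # instead of materializing the ~24 border cells and membership-testing each.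
--     for o in depostis_outlets:
--         if isinstance(o, list) and len(o) == 2:
--             ox, oy = o
--             if ((oy == y - 1 or oy == y + 6) and x - 1 <= ox <= x + 5) or \
--                ((ox == x - 1 or ox == x + 6) and y <= oy <= y + 4):
--                 return False
--     return True
-- ===== Notes on version B (the rewrite author's own statement) =====
-- stated objective: alternative
-- what changed: B loops over the outlets and tests each against an arithmetic frame predicate, instead of materializing the ~24 border cells and testing each for list membership.
import Mathlib
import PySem

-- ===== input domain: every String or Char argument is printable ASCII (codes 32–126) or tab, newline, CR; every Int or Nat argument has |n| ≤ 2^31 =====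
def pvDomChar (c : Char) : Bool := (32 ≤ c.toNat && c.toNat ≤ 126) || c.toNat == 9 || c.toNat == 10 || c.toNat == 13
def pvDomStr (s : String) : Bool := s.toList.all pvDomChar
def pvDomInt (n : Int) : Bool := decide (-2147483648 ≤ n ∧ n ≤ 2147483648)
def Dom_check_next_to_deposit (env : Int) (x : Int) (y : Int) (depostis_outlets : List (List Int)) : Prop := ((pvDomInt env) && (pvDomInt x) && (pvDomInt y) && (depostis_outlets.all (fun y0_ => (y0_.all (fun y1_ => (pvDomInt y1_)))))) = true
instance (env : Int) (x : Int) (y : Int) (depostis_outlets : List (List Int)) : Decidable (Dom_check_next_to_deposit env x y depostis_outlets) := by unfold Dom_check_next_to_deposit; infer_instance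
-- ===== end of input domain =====

-- B replaces A's materialized border-cell list + membership test per cell by a single
-- pass over the outlets with an arithmetic frame predicate (alternative decomposition).

-- ===== PORT A =====
def check_next_to_deposit (env : Int) (x : Int) (y : Int) (depostis_outlets : List (List Int)) : Bool :=
  -- border = []; two append loops over range(x-1,x+6) and range(y,y+5)
  let border : List (List Int) :=
    (PySem.List.pyRange (x - 1) (x + 6) 1).foldl
      (fun acc i => acc ++ [[i, y - 1], [i, y + 6]]) []
  let border : List (List Int) :=
    (PySem.List.pyRange y (y + 5) 1).foldl
      (fun acc i => acc ++ [[x - 1, i], [x + 6, i]]) border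
  -- for b in border: if b in depostis_outlets: return False \n return True
  !(border.any (fun b => decide (b ∈ depostis_outlets)))

-- ===== PORT B =====
def check_next_to_deposit_alt (env : Int) (x : Int) (y : Int) (depostis_outlets : List (List Int)) : Bool :=
  !(depostis_outlets.any (fun o =>
    match o with
    | [ox, oy] =>
        (((oy == y - 1) || (oy == y + 6)) && (decide (x - 1 ≤ ox) && decide (ox ≤ x + 5))) ||
        (((ox == x - 1) || (ox == x + 6)) && (decide (y ≤ oy) && decide (oy ≤ y + 4)))
    | _ => false))

-- ===== PRECONDITION & SPEC =====
def Spec_check_next_to_deposit (env : Int) (x : Int) (y : Int) (depostis_outlets : List (List Int)) (out : Bool) : Prop := out = check_next_to_deposit_alt env x y depostis_outlets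
instance (env : Int) (x : Int) (y : Int) (depostis_outlets : List (List Int)) (out : Bool) : Decidable (Spec_check_next_to_deposit env x y depostis_outlets out) := by unfold Spec_check_next_to_deposit; infer_instance

-- ===== CLAIM (what is proved, stated in full; the proofs are below) =====
def Claim_equal_check_next_to_deposit : Prop := ∀ (env : Int) (x : Int) (y : Int) (depostis_outlets : List (List Int)), Dom_check_next_to_deposit env x y depostis_outlets → Spec_check_next_to_deposit env x y depostis_outlets (check_next_to_deposit env x y depostis_outlets)

-- ===== LEMMAS AND PROOFS =====

-- the frame predicate B tests (as a Prop), for a length-2 outlet [ox, oy]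
def pvFrame (x y ox oy : Int) : Prop :=
  ((oy = y - 1 ∨ oy = y + 6) ∧ (x - 1 ≤ ox ∧ ox ≤ x + 5)) ∨
  ((ox = x - 1 ∨ ox = x + 6) ∧ (y ≤ oy ∧ oy ≤ y + 4))

-- A's border list, written via flatMap
def pvBorder (x y : Int) : List (List Int) :=
  ((PySem.List.pyRange (x - 1) (x + 6) 1).flatMap (fun i => [[i, y - 1], [i, y + 6]])) ++
  ((PySem.List.pyRange y (y + 5) 1).flatMap (fun i => [[x - 1, i], [x + 6, i]]))

lemma mem_pvBorder_iff (x y : Int) (o : List Int) :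
    o ∈ pvBorder x y ↔ ∃ ox oy, o = [ox, oy] ∧ pvFrame x y ox oy := by
  unfold pvBorder pvFrame
  simp only [List.mem_append, List.mem_flatMap, PySem.List.mem_pyRange_one,
    List.mem_cons, List.not_mem_nil, or_false]
  constructor
  · rintro (⟨i, ⟨h1, h2⟩, (rfl | rfl)⟩ | ⟨i, ⟨h1, h2⟩, (rfl | rfl)⟩)
    · exact ⟨i, y - 1, rfl, Or.inl ⟨Or.inl rfl, by omega⟩⟩
    · exact ⟨i, y + 6, rfl, Or.inl ⟨Or.inr rfl, by omega⟩⟩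
    · exact ⟨x - 1, i, rfl, Or.inr ⟨Or.inl rfl, by omega⟩⟩
    · exact ⟨x + 6, i, rfl, Or.inr ⟨Or.inr rfl, by omega⟩⟩
  · rintro ⟨ox, oy, rfl, (⟨(rfl | rfl), hx⟩ | ⟨(rfl | rfl), hy⟩)⟩
    · exact Or.inl ⟨ox, by omega, Or.inl rfl⟩
    · exact Or.inl ⟨ox, by omega, Or.inr rfl⟩
    · exact Or.inr ⟨oy, by omega, Or.inl rfl⟩
    · exact Or.inr ⟨oy, by omega, Or.inr rfl⟩

lemma pred_eq_mem_border (x y : Int) (o : List Int) :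
    (match o with
     | [ox, oy] =>
        (((oy == y - 1) || (oy == y + 6)) && (decide (x - 1 ≤ ox) && decide (ox ≤ x + 5))) ||
        (((ox == x - 1) || (ox == x + 6)) && (decide (y ≤ oy) && decide (oy ≤ y + 4)))
     | _ => false) = true ↔ o ∈ pvBorder x y := by
  rw [mem_pvBorder_iff]
  match o with
  | [] => simp
  | [_] => simp
  | ox :: oy :: _ :: _ => simp
  | [ox, oy] =>
    simp only [Bool.or_eq_true, Bool.and_eq_true, beq_iff_eq, decide_eq_true_eq]
    constructor
    · rintro h
      exact ⟨ox, oy, rfl, by unfold pvFrame; tauto⟩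
    · rintro ⟨ox', oy', heq, hf⟩
      obtain ⟨rfl, rfl⟩ : ox = ox' ∧ oy = oy' := by
        simpa using heq
      unfold pvFrame at hf; tauto

-- ===== VERDICT (by name: the statement is the Claim_ definition above) =====
theorem check_next_to_deposit_spec : Claim_equal_check_next_to_deposit := by
  intro env x y D _
  unfold Spec_check_next_to_deposit check_next_to_deposit check_next_to_deposit_alt
  have hborder :
      ((PySem.List.pyRange y (y + 5) 1).foldl
        (fun acc i => acc ++ [[x - 1, i], [x + 6, i]])
        ((PySem.List.pyRange (x - 1) (x + 6) 1).foldl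
          (fun acc i => acc ++ [[i, y - 1], [i, y + 6]]) [])) = pvBorder x y := by
    rw [PySem.List.foldl_append_eq_flatMap, PySem.List.foldl_append_eq_flatMap]
    simp [pvBorder]
  simp only [hborder]
  congr 1
  rw [Bool.eq_iff_iff]
  simp only [List.any_eq_true, decide_eq_true_eq]
  constructor
  · rintro ⟨b, hb, hbD⟩
    exact ⟨b, hbD, (pred_eq_mem_border x y b).mpr hb⟩
  · rintro ⟨o, hoD, ho⟩
    exact ⟨o, (pred_eq_mem_border x y o).mp ho, hoD⟩
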